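-- pv_equiv track=rewrite | github.com/TruongAnim/algorithm | codeforces/contest/1985/problem/B/main.py | check
-- ===== SOURCE A (Python) =====
-- def check(a, n):
--     s = 0
--     for i in range(1, 100):
--         if a * i <= n:
--             s += a * i
--         else:
--             break
--     return s
-- ===== SOURCE B (Python) =====
-- def check(a, n):
--     if a > 0:
--         k = max(0, min(99, n // a))
--         return a * k * (k + 1) // 2
--     if a < 0:
--         return a * 4950 if a <= n else 0
--     return 0
-- ===== Notes on version B (the rewrite author's own statement) =====
-- stated objective: simpler
-- what changed: Replaced the bounded trial loop with a closed-form count-and-sum: k = max(0, min(99, n // a)) terms for a > 0 giving a*k*(k+1)//2, the full 99-term sum a*4950 or 0 for a < 0, and 0 for a == 0.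
import Mathlib
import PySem

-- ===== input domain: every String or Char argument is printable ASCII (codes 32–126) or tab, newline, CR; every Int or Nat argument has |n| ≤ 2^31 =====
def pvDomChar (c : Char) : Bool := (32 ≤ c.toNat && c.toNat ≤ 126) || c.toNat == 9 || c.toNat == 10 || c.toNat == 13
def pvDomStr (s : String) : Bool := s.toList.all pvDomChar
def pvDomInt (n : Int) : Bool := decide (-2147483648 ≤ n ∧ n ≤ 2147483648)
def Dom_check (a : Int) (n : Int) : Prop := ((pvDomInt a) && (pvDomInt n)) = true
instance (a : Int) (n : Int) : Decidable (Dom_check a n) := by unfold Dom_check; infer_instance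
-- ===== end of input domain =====

-- B replaces A's bounded trial loop with a closed-form count-and-sum (simpler; no iteration).


-- ===== PORT A =====
-- 'for i in range(1, 100): if a*i <= n: s += a*i else: break'; fuel = remaining iterations
def checkLoop (a : Int) (n : Int) : Nat → Int → Int → Int
  | 0, _, s => s
  | f + 1, i, s => if a * i ≤ n then checkLoop a n f (i + 1) (s + a * i) else s

def check (a : Int) (n : Int) : Int := checkLoop a n 99 1 0

-- ===== PORT B =====
def check_alt (a : Int) (n : Int) : Int :=
  if a > 0 then
    let k := max 0 (min 99 (PySem.Int.floordiv n a))
    PySem.Int.floordiv (a * k * (k + 1)) 2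
  else if a < 0 then
    if a ≤ n then a * 4950 else 0
  else 0

-- ===== PRECONDITION & SPEC =====
def Spec_check (a : Int) (n : Int) (out : Int) : Prop := out = check_alt a n
instance (a : Int) (n : Int) (out : Int) : Decidable (Spec_check a n out) := by unfold Spec_check; infer_instance

-- ===== CLAIM (what is proved, stated in full; the proofs are below) =====
def Claim_equal_check : Prop := ∀ (a : Int) (n : Int), Dom_check a n → Spec_check a n (check a n)

-- ===== LEMMAS AND PROOFS =====

-- triangle number x*(x+1)/2 (x*(x+1) is even, so the division is exact)
def tri (x : Int) : Int := x * (x + 1) / 2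

theorem two_tri (x : Int) : 2 * tri x = x * (x + 1) := by
  unfold tri
  obtain ⟨c, hc⟩ := (Int.even_mul_succ_self x).two_dvd
  omega

theorem tri_step (i : Int) : tri i - tri (i - 1) = i := by
  have h1 := two_tri i
  have h2 := two_tri (i - 1)
  nlinarith

theorem checkLoop_zero (n : Int) : ∀ (f : Nat) (i s : Int), checkLoop 0 n f i s = s := by
  intro f
  induction f with
  | zero => intro i s; rfl
  | succ f ih =>
    intro i s
    simp only [checkLoop, zero_mul, add_zero]
    split_ifs <;> simp [ih]

theorem checkLoop_neg (a n : Int) (ha : a < 0) (han : a ≤ n) :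
    ∀ (f : Nat) (i s : Int), 1 ≤ i →
      checkLoop a n f i s = s + a * (tri (i + f - 1) - tri (i - 1)) := by
  intro f
  induction f with
  | zero => intro i s _; simp [checkLoop]
  | succ f ih =>
    intro i s hi
    have hle : a * i ≤ n := by nlinarith
    simp only [checkLoop, if_pos hle]
    rw [ih (i + 1) (s + a * i) (by omega)]
    have h3 : tri i = tri (i - 1) + i := by linarith [tri_step i]
    push_cast
    rw [show (i : Int) + 1 + (f : Int) - 1 = i + ((f : Int) + 1) - 1 from by ring,
        show (i : Int) + 1 - 1 = i from by ring, h3]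
    ring

theorem checkLoop_pos (a n : Int) (ha : 0 < a) :
    ∀ (f : Nat) (i s : Int), 1 ≤ i →
      checkLoop a n f i s = s + a * (tri (max (i - 1) (min (n / a) (i + f - 1))) - tri (i - 1)) := by
  intro f
  induction f with
  | zero =>
    intro i s _
    simp [checkLoop]
  | succ f ih =>
    intro i s hi
    have hiff : a * i ≤ n ↔ i ≤ n / a := by
      rw [Int.le_ediv_iff_mul_le ha, mul_comm]
    by_cases hc : a * i ≤ n
    · have hq : i ≤ n / a := hiff.mp hc
      simp only [checkLoop, if_pos hc]
      rw [ih (i + 1) (s + a * i) (by omega)]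
      have hm : max ((i : Int) + 1 - 1) (min (n / a) (i + 1 + (f : Int) - 1)) =
          max (i - 1) (min (n / a) (i + (((f : Nat) + 1 : Nat) : Int) - 1)) := by
        push_cast; omega
      have h3 : tri i = tri (i - 1) + i := by linarith [tri_step i]
      push_cast at hm ⊢
      rw [hm, show (i : Int) + 1 - 1 = i from by ring, h3]
      ring
    · have hq : n / a < i := by
        by_contra h
        exact hc (hiff.mpr (by omega))
      have hm : max (i - 1) (min (n / a) (i + (((f : Nat) + 1 : Nat) : Int) - 1)) = i - 1 := by
        push_cast; omega
      simp only [checkLoop, if_neg hc, hm]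
      ring

theorem check_spec : Claim_equal_check := by
  intro a n _
  unfold Spec_check check check_alt
  rcases lt_trichotomy a 0 with ha | ha | ha
  · -- a < 0
    rw [if_neg (by omega), if_pos ha]
    by_cases han : a ≤ n
    · rw [if_pos han, checkLoop_neg a n ha han 99 1 0 (by omega)]
      norm_num [tri]
    · rw [if_neg han]
      have hb : ¬ a * (1 : Int) ≤ n := by omega
      show checkLoop a n (98 + 1) 1 0 = 0
      rw [checkLoop, if_neg hb]
  · subst ha
    rw [checkLoop_zero n 99 1 0]
    norm_num
  · -- a > 0
    rw [if_pos ha, checkLoop_pos a n ha 99 1 0 (by omega)]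
    rw [PySem.Int.floordiv_eq_ediv_of_pos ha, PySem.Int.floordiv_eq_ediv_of_pos (by omega : (0:Int) < 2)]
    set k : Int := max 0 (min 99 (n / a)) with hk
    have hm : max ((1 : Int) - 1) (min (n / a) (1 + ((99 : Nat) : Int) - 1)) = k := by
      push_cast; omega
    rw [hm]
    have htri0 : tri (1 - 1) = 0 := by norm_num [tri]
    have h2 : a * k * (k + 1) = 2 * (a * tri k) := by
      have := two_tri k; nlinarith
    rw [htri0, h2, Int.mul_ediv_cancel_left _ (by omega : (2:Int) ≠ 0)]
    ring
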